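-- pv_equiv track=rewrite | github.com/S3nna13/Aurelius | src/data/sequence_packing_v2.py | create_position_ids
-- ===== SOURCE A (Python) =====
-- def create_position_ids(sequence_ids: list[int]) -> list[int]:
--     """Create per-token position ids that reset at each new sequence boundary.
--
--     The position counter resets to 0 whenever a new (non -1) sequence begins.
--     EOS separators (sequence_id == -1) and padding keep position 0.
--
--     Args:
--         sequence_ids: Per-token sequence index list; -1 for EOS/padding.
--
--     Returns:
--         List of int, same length as sequence_ids.
--     """
--     position_ids: list[int] = []
--     pos = 0
--     prev_sid = None  # sentinel: no previous token
--
--     for sid in sequence_ids: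
--         if sid == -1:
--             # EOS separator or padding: position 0, do not advance counter
--             position_ids.append(0)
--             prev_sid = sid
--         elif prev_sid is None or prev_sid == -1 or sid != prev_sid:
--             # Start of a new (real) sequence
--             pos = 0
--             position_ids.append(pos)
--             pos += 1
--             prev_sid = sid
--         else:
--             # Continuing the same sequence
--             position_ids.append(pos)
--             pos += 1
--             prev_sid = sid
--
--     return position_ids
-- ===== SOURCE B (Python) =====
-- from itertools import groupby
--
--
-- def create_position_ids(sequence_ids: list[int]) -> list[int]:
--     out: list[int] = []
--     for key, grp in groupby(sequence_ids):
--         n = sum(1 for _ in grp)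
--         if key == -1:
--             out.extend([0] * n)
--         else:
--             out.extend(range(n))
--     return out
-- ===== Notes on version B (the rewrite author's own statement) =====
-- stated objective: idiomatic
-- what changed: Replaces the stateful pos/prev_sid counter loop with itertools.groupby over runs of equal ids: each -1 run yields zeros, each other run yields range(len(run)).
import Mathlib
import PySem

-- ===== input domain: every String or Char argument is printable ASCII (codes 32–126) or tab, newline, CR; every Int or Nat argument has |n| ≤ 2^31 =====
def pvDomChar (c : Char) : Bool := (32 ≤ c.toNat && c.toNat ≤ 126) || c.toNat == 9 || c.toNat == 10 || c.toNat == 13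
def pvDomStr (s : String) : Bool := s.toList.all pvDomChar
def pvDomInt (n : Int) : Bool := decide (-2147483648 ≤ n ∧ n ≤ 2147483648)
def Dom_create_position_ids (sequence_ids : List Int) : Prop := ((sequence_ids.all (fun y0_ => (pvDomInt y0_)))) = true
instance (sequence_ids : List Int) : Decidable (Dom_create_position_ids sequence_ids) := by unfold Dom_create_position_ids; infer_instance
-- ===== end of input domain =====

-- B replaces A's stateful pos/prev_sid counter loop with a run (groupby) decomposition: idiomatic, same cost.

-- ===== PORT A =====
-- loop body of A: state is (position_ids, pos, prev_sid)
def cpiStep (st : List Int × Int × Option Int) (sid : Int) : List Int × Int × Option Int :=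
  let (position_ids, pos, prev_sid) := st
  if sid = -1 then
    (position_ids ++ [(0 : Int)], pos, some sid)
  else
    match prev_sid with
    | none => (position_ids ++ [(0 : Int)], 1, some sid)   -- pos = 0; append pos; pos += 1
    | some p =>
      if p = -1 ∨ sid ≠ p then (position_ids ++ [(0 : Int)], 1, some sid)
      else (position_ids ++ [pos], pos + 1, some sid)

def create_position_ids (sequence_ids : List Int) : List Int :=
  (sequence_ids.foldl cpiStep ([], 0, none)).1

-- ===== PORT B =====
-- groupby: peel off the run of ids equal to the head, emit zeros or 0..n-1, recurse on the rest
def create_position_ids_alt (sequence_ids : List Int) : List Int :=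
  match sequence_ids with
  | [] => []
  | x :: xs =>
    let n := (xs.takeWhile (· == x)).length
    (if x = -1 then List.replicate (n + 1) (0 : Int)
     else (List.range (n + 1)).map Int.ofNat) ++
      create_position_ids_alt (xs.dropWhile (· == x))
termination_by sequence_ids.length
decreasing_by
  simp only [List.length_cons]
  exact Nat.lt_succ_of_le (List.length_dropWhile_le _ _)

-- ===== PRECONDITION & SPEC =====
def Spec_create_position_ids (sequence_ids : List Int) (out : List Int) : Prop := out = create_position_ids_alt sequence_ids
instance (sequence_ids : List Int) (out : List Int) : Decidable (Spec_create_position_ids sequence_ids out) := by unfold Spec_create_position_ids; infer_instance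

-- ===== CLAIM (what is proved, stated in full; the proofs are below) =====
def Claim_equal_create_position_ids : Prop := ∀ (sequence_ids : List Int), Dom_create_position_ids sequence_ids → Spec_create_position_ids sequence_ids (create_position_ids sequence_ids)

-- ===== LEMMAS AND PROOFS =====

-- 'prev' does not continue the run starting l: the first element of l (if any) resets the counter
def cpiFresh (prev : Option Int) (l : List Int) : Prop :=
  prev = none ∨ prev = some (-1) ∨ ∀ h, l.head? = some h → prev ≠ some h

theorem cpi_head_drop (p : Int → Bool) :
    ∀ (l : List Int) (h : Int), (l.dropWhile p).head? = some h → p h = false := by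
  intro l
  induction l with
  | nil => intro h hh; simp at hh
  | cons a as ih =>
    intro h hh
    by_cases hp : p a
    · rw [List.dropWhile_cons_of_pos hp] at hh; exact ih h hh
    · rw [List.dropWhile_cons_of_neg hp] at hh
      simp at hh
      subst hh
      simpa using hp

-- processing a run of n copies of x ≠ -1 while already inside that run counts pos upward
theorem cpi_run_cont (x : Int) (hx : x ≠ -1) :
    ∀ (n : ℕ) (acc : List Int) (p : ℕ),
      (List.replicate n x).foldl cpiStep (acc, ((p : ℕ) : Int), some x)
        = (acc ++ (List.range' p n).map Int.ofNat, (((p + n : ℕ)) : Int), some x) := by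
  intro n
  induction n with
  | zero => intro acc p; simp
  | succ n ih =>
    intro acc p
    have hstep : cpiStep (acc, ((p : ℕ) : Int), some x) x
        = (acc ++ [((p : ℕ) : Int)], ((p : ℕ) : Int) + 1, some x) := by
      simp [cpiStep, hx]
    have hc : ((p : ℕ) : Int) + 1 = (((p + 1 : ℕ)) : Int) := by push_cast; ring
    rw [List.replicate_succ, List.foldl_cons, hstep, hc, ih]
    simp only [List.range'_succ, List.map_cons, Prod.mk.injEq]
    refine ⟨by simp, by push_cast; ring, trivial⟩

-- processing a run of n copies of -1 appends n zeros and keeps pos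
theorem cpi_run_neg :
    ∀ (n : ℕ) (acc : List Int) (pos : Int),
      (List.replicate n (-1 : Int)).foldl cpiStep (acc, pos, some (-1))
        = (acc ++ List.replicate n (0 : Int), pos, some (-1)) := by
  intro n
  induction n with
  | zero => intro acc pos; simp
  | succ n ih =>
    intro acc pos
    have hstep : cpiStep (acc, pos, some (-1)) (-1)
        = (acc ++ [(0 : Int)], pos, some (-1)) := by
      simp [cpiStep]
    rw [List.replicate_succ, List.foldl_cons, hstep, ih, List.replicate_succ]
    simp

theorem cpi_takeWhile_replicate (x : Int) (xs : List Int) :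
    xs.takeWhile (· == x) = List.replicate (xs.takeWhile (· == x)).length x := by
  apply List.eq_replicate_length.mpr
  intro b hb
  have := List.mem_takeWhile_imp hb
  simpa using this

theorem cpi_alt_cons (x : Int) (xs : List Int) :
    create_position_ids_alt (x :: xs)
      = (if x = -1 then List.replicate ((xs.takeWhile (· == x)).length + 1) (0 : Int)
         else (List.range ((xs.takeWhile (· == x)).length + 1)).map Int.ofNat) ++
          create_position_ids_alt (xs.dropWhile (· == x)) := by
  rw [create_position_ids_alt]

theorem cpi_main :
    ∀ (l : List Int) (acc : List Int) (pos : Int) (prev : Option Int),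
      cpiFresh prev l →
      (l.foldl cpiStep (acc, pos, prev)).1 = acc ++ create_position_ids_alt l := by
  intro l
  induction l using create_position_ids_alt.induct with
  | case1 => intro acc pos prev _; simp [create_position_ids_alt]
  | case2 x xs ih =>
    intro acc pos prev hfresh
    have hsplit : x :: xs
        = x :: (List.replicate (xs.takeWhile (· == x)).length x ++ xs.dropWhile (· == x)) := by
      rw [← cpi_takeWhile_replicate, List.takeWhile_append_dropWhile]
    have hfreshrest : cpiFresh (some x) (xs.dropWhile (· == x)) := by
      by_cases hx1 : x = -1
      · subst hx1; exact Or.inr (Or.inl rfl)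
      · refine Or.inr (Or.inr ?_)
        intro h hh hcontra
        have hxh : x = h := by injection hcontra
        have hnp := cpi_head_drop (· == x) xs h hh
        simp [← hxh] at hnp
    by_cases hx : x = -1
    · subst hx
      have hstep : cpiStep (acc, pos, prev) (-1) = (acc ++ [(0 : Int)], pos, some (-1)) := by
        simp [cpiStep]
      rw [cpi_alt_cons]
      conv_lhs => rw [hsplit]
      rw [List.foldl_cons, hstep, List.foldl_append, cpi_run_neg,
        ih _ _ _ hfreshrest]
      simp [List.replicate_succ, List.append_assoc]
    · have hstep : cpiStep (acc, pos, prev) x = (acc ++ [(0 : Int)], 1, some x) := by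
        rcases hfresh with h | h | h
        · subst h; simp [cpiStep, hx]
        · subst h; simp [cpiStep, hx]
        · have hne : prev ≠ some x := h x rfl
          match prev with
          | none => simp [cpiStep, hx]
          | some p =>
            have hpx : x ≠ p := fun he => hne (by rw [he])
            simp [cpiStep, hx, hpx]
      have h1 : (1 : Int) = ((1 : ℕ) : Int) := rfl
      have hr : (List.range ((xs.takeWhile (· == x)).length + 1)).map Int.ofNat
          = (0 : Int) :: (List.range' 1 (xs.takeWhile (· == x)).length).map Int.ofNat := by
        rw [List.range_eq_range', List.range'_succ]
        simp
      rw [cpi_alt_cons, if_neg hx, hr]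
      conv_lhs => rw [hsplit]
      rw [List.foldl_cons, hstep, List.foldl_append, h1,
        cpi_run_cont x hx, ih _ _ _ hfreshrest]
      simp [List.append_assoc]

-- ===== VERDICT (by name: the statement is the Claim_ definition above) =====
theorem create_position_ids_spec : Claim_equal_create_position_ids := by
  intro l _
  unfold Spec_create_position_ids create_position_ids
  exact cpi_main l [] 0 none (Or.inl rfl)
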